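-- pv_equiv track=rewrite | github.com/kimgyuhee/Python | Chapter0_Algorithm/2305/230510/test01.py | solution
-- ===== SOURCE A (Python) =====
-- def solution(arr):
--     ret = 0
--     while True:
--         tmp = list(map(lambda x: x // 2 if x >= 50 and ~x & 1 else x * 2 + 1 if x < 50 and x & 1 else x, arr[:]))
--         if arr == tmp:
--             break
--         arr = tmp[:]
--         ret += 1
--
--     return ret
-- ===== SOURCE B (Python) =====
-- def solution(arr):
--     def steps(x):
--         c = 0
--         while x >= 50 and x % 2 == 0:   # halving phase
--             x //= 2
--             c += 1
--         if x % 2 == 1 and 0 < x < 50:   # doubling phase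
--             while x < 50:
--                 x = 2 * x + 1
--                 c += 1
--         return c
--     return max(map(steps, arr), default=0)
-- ===== Notes on version B (the rewrite author's own statement) =====
-- stated objective: alternative
-- what changed: A repeatedly maps the transformation over the whole list until a global fixed point; B instead runs each element independently to its own fixed point in two phases (halve while >=50 and even, then double while <50) and returns the maximum per-element step count, so stable elements are visited once instead of once per round.
import Mathlib
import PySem

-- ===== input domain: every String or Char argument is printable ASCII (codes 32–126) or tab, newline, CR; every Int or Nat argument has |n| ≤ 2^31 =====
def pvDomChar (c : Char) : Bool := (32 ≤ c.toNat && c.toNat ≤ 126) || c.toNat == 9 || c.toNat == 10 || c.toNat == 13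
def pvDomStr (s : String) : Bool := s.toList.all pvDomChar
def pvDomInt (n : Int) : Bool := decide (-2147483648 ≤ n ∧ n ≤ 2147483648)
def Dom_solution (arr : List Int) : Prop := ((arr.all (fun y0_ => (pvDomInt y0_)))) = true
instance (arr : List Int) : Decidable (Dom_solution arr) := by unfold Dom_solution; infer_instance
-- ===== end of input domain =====

-- B replaces A's whole-array rounds-to-global-fixed-point loop by an independent
-- two-phase per-element run to each element's own fixed point, returning the maximum
-- per-element step count (objective: alternative; stable elements are visited once).

-- ===== PORT A =====
-- the lambda's body; Python's `~x & 1` (low bit of ~x) is ported exactly as (-x-1) mod 2 ≠ 0,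
-- and `x & 1` as x mod 2 ≠ 0 (the low bit of a Python int is its value mod 2).
def fA (x : Int) : Int :=
  if 50 ≤ x ∧ PySem.Int.mod (-x - 1) 2 ≠ 0 then PySem.Int.floordiv x 2
  else if x < 50 ∧ PySem.Int.mod x 2 ≠ 0 then x * 2 + 1
  else x

def pvFuel : Nat := 2147483699  -- fuel only makes A's `while True` total; large enough on Dom ∧ Pre (proved below)

-- the `while True` loop of A
def aLoop : Nat → List Int → Int → Int
  | 0, _, ret => ret
  | fuel + 1, arr, ret =>
      let tmp := arr.map fA
      if arr = tmp then ret else aLoop fuel tmp (ret + 1)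

def solution (arr : List Int) : Int := aLoop pvFuel arr 0

-- ===== PORT B =====
-- B's halving phase `while x >= 50 and x % 2 == 0: x //= 2; c += 1`; the fuel only
-- bounds the while loop and is sufficient on Dom (proved below)
def halveGo : Nat → Int → Int → Int × Int
  | 0, x, c => (x, c)
  | fuel + 1, x, c =>
      if 50 ≤ x ∧ PySem.Int.mod x 2 = 0 then halveGo fuel (PySem.Int.floordiv x 2) (c + 1)
      else (x, c)

-- B's doubling phase `while x < 50: x = 2 * x + 1; c += 1` (entered only on odd 0 < x < 50)
def doubleGo : Nat → Int → Int → Int × Int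
  | 0, x, c => (x, c)
  | fuel + 1, x, c =>
      if x < 50 then doubleGo fuel (2 * x + 1) (c + 1)
      else (x, c)

-- B's per-element `steps`
def stepsB (x : Int) : Int :=
  let r := halveGo 32 x 0
  if PySem.Int.mod r.1 2 = 1 ∧ 0 < r.1 ∧ r.1 < 50 then (doubleGo 64 r.1 r.2).2 else r.2

-- max(map(steps, arr), default=0)
def solution_alt (arr : List Int) : Int := (arr.map stepsB).foldl max 0

-- ===== PRECONDITION & SPEC =====
-- Pre_ excludes lists containing an odd element ≤ -3: on those A's while-loop never
-- reaches a fixed point (the element keeps strictly decreasing), so A diverges.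
def Pre_solution (arr : List Int) : Prop := ∀ x ∈ arr, -1 ≤ x ∨ x % 2 = 0
instance (arr : List Int) : Decidable (Pre_solution arr) := by unfold Pre_solution; infer_instance
def pvWitness_solution : List Int := [1, 100, -4, 49]

def Spec_solution (arr : List Int) (out : Int) : Prop := out = solution_alt arr
instance (arr : List Int) (out : Int) : Decidable (Spec_solution arr out) := by unfold Spec_solution; infer_instance

-- ===== CLAIM (what is proved, stated in full; the proofs are below) =====
def Claim_equal_solution : Prop := ∀ (arr : List Int), Dom_solution arr → Pre_solution arr → Spec_solution arr (solution arr)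

-- ===== LEMMAS AND PROOFS =====

theorem pvMod2 (x : Int) : PySem.Int.mod x 2 = x % 2 :=
  PySem.Int.mod_eq_emod_of_pos (by norm_num)

theorem pvDiv2 (x : Int) : PySem.Int.floordiv x 2 = x / 2 :=
  PySem.Int.floordiv_eq_ediv_of_pos (by norm_num)

-- clean form of A's step function
theorem fA_eval (x : Int) :
    fA x = if 50 ≤ x ∧ x % 2 = 0 then x / 2 else if x < 50 ∧ x % 2 ≠ 0 then x * 2 + 1 else x := by
  unfold fA
  simp only [pvMod2, pvDiv2]
  split_ifs <;> first | rfl | omega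

-- per-element invariant (this is Pre_solution element-wise)
def G (x : Int) : Prop := -1 ≤ x ∨ x % 2 = 0

-- proof-side ideal per-element step count (well-founded recursion; NOT part of either port)
def muB (x : Int) : Nat :=
  if 50 ≤ x then (if x % 2 = 0 then x.toNat else 0)
  else if 0 < x ∧ x % 2 = 1 then (51 - x).toNat else 0

theorem pvDecB1 (x : Int) (h : 50 ≤ x ∧ x % 2 = 0) : muB (x / 2) < muB x := by
  unfold muB
  split_ifs <;> omega

theorem pvDecB2 (x : Int) (h2 : 0 < x ∧ x < 50 ∧ x % 2 = 1) : muB (2 * x + 1) < muB x := by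
  unfold muB
  split_ifs <;> omega

def sW (x : Int) : Int :=
  if h1 : 50 ≤ x ∧ x % 2 = 0 then 1 + sW (x / 2)
  else if h2 : 0 < x ∧ x < 50 ∧ x % 2 = 1 then 1 + sW (2 * x + 1)
  else 0
termination_by muB x
decreasing_by
  · exact pvDecB1 x h1
  · exact pvDecB2 x h2

theorem sW_eval (x : Int) :
    sW x = if 50 ≤ x ∧ x % 2 = 0 then 1 + sW (x / 2)
           else if 0 < x ∧ x < 50 ∧ x % 2 = 1 then 1 + sW (2 * x + 1) else 0 := by
  rw [sW]
  split_ifs <;> rfl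

-- sW agrees step for step with A's lambda on G
theorem sW_rec (x : Int) (hg : G x) :
    sW x = if fA x = x then 0 else 1 + sW (fA x) := by
  by_cases h1 : 50 ≤ x ∧ x % 2 = 0
  · have hfa : fA x = x / 2 := by rw [fA_eval, if_pos h1]
    have hne : ¬ (x / 2 = x) := by omega
    rw [sW_eval, if_pos h1, hfa, if_neg hne]
  · by_cases h2 : 0 < x ∧ x < 50 ∧ x % 2 = 1
    · have hfa : fA x = x * 2 + 1 := by rw [fA_eval, if_neg h1, if_pos ⟨h2.2.1, by omega⟩]
      have hne : ¬ (x * 2 + 1 = x) := by omega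
      rw [sW_eval, if_neg h1, if_pos h2, hfa, if_neg hne]
      ring_nf
    · have hfa : fA x = x := by
        by_cases h3 : x < 50 ∧ x % 2 ≠ 0
        · have hx : x = -1 := by unfold G at hg; omega
          rw [fA_eval, if_neg h1, if_pos h3, hx]; norm_num
        · rw [fA_eval, if_neg h1, if_neg h3]
      rw [sW_eval, if_neg h1, if_neg h2, hfa, if_pos rfl]

theorem fA_cases (x : Int) (hg : G x) (hne : fA x ≠ x) :
    (50 ≤ x ∧ x % 2 = 0 ∧ fA x = x / 2) ∨ (1 ≤ x ∧ x < 50 ∧ x % 2 = 1 ∧ fA x = x * 2 + 1) := by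
  rw [fA_eval] at hne
  by_cases h1 : 50 ≤ x ∧ x % 2 = 0
  · exact Or.inl ⟨h1.1, h1.2, by rw [fA_eval, if_pos h1]⟩
  · by_cases h3 : x < 50 ∧ x % 2 ≠ 0
    · rw [if_neg h1, if_pos h3] at hne
      have hx1 : 1 ≤ x := by unfold G at hg; omega
      exact Or.inr ⟨hx1, h3.1, by omega, by rw [fA_eval, if_neg h1, if_pos h3]⟩
    · rw [if_neg h1, if_neg h3] at hne; exact absurd rfl hne

-- termination measure driving A's global loop
def mu (x : Int) : Nat :=
  if fA x = x then 1 else if 50 ≤ x then x.toNat else (51 - x).toNat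

theorem key_decrease (x : Int) (hg : G x) (hne : fA x ≠ x) :
    G (fA x) ∧ mu (fA x) < mu x := by
  rcases fA_cases x hg hne with ⟨h50, hev, hfx⟩ | ⟨h1, h50, hod, hfx⟩
  · have hmu_x : mu x = x.toNat := by unfold mu; rw [if_neg hne, if_pos h50]
    have hb : mu (x / 2) < x.toNat := by unfold mu; split_ifs <;> omega
    exact ⟨by unfold G; left; omega, by rw [hfx, hmu_x]; exact hfx ▸ hb⟩
  · have hmu_x : mu x = (51 - x).toNat := by unfold mu; rw [if_neg hne, if_neg (by omega)]
    have hb : mu (x * 2 + 1) < (51 - x).toNat := by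
      unfold mu
      split_ifs with hf h5
      · omega
      · exfalso
        apply hf
        rw [fA_eval, if_neg (by omega), if_neg (by omega)]
      · omega
    exact ⟨by unfold G; left; omega, by rw [hfx, hmu_x]; exact hb⟩

theorem mu_pos (x : Int) : 1 ≤ mu x := by
  unfold mu; split_ifs <;> omega

theorem sW_nonneg (x : Int) : 0 ≤ sW x := by
  induction x using sW.induct with
  | case1 x h ih => rw [sW_eval, if_pos h]; omega
  | case2 x h1 h2 ih => rw [sW_eval, if_neg h1, if_pos h2]; omega
  | case3 x h1 h2 => rw [sW_eval, if_neg h1, if_neg h2]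

theorem sW_fix (x : Int) (hg : G x) (h : fA x = x) : sW x = 0 := by
  rw [sW_rec x hg, if_pos h]

-- generic facts about the fold computing the maximum
theorem foldl_max_acc_le (g : Int → Int) (arr : List Int) : ∀ a : Int,
    a ≤ arr.foldl (fun b x => max b (g x)) a := by
  induction arr with
  | nil => intro a; simp
  | cons y t ih =>
    intro a
    have := ih (max a (g y))
    simp only [List.foldl]
    exact le_trans (le_max_left _ _) this

theorem foldl_max_mem_le (g : Int → Int) (arr : List Int) : ∀ (a : Int) (x : Int), x ∈ arr →
    g x ≤ arr.foldl (fun b x => max b (g x)) a := by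
  induction arr with
  | nil => intro a x hx; cases hx
  | cons y t ih =>
    intro a x hx
    simp only [List.foldl]
    rcases List.mem_cons.1 hx with rfl | hx
    · exact le_trans (le_max_right _ _) (foldl_max_acc_le g t _)
    · exact ih _ x hx

theorem foldl_max_cases (g : Int → Int) (arr : List Int) : ∀ a : Int,
    arr.foldl (fun b x => max b (g x)) a = a ∨ ∃ x ∈ arr, arr.foldl (fun b x => max b (g x)) a = g x := by
  induction arr with
  | nil => intro a; left; rfl
  | cons y t ih =>
    intro a
    simp only [List.foldl]
    rcases ih (max a (g y)) with h | ⟨x, hx, h⟩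
    · rw [h]
      rcases max_choice a (g y) with h' | h'
      · left; exact h'
      · right; exact ⟨y, List.mem_cons_self, h'⟩
    · right; exact ⟨x, List.mem_cons_of_mem _ hx, h⟩

theorem exists_nonfixed {arr : List Int} (hne : arr ≠ arr.map fA) :
    ∃ z ∈ arr, fA z ≠ z := by
  by_contra hco
  push Not at hco
  apply hne
  apply List.ext_getElem (by simp)
  intro i h1 h2
  simp only [List.getElem_map]
  exact (hco _ (List.getElem_mem h1)).symm

theorem fixed_of_eq_map {arr : List Int} (heq : arr = arr.map fA) :
    ∀ x ∈ arr, fA x = x := by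
  intro x hx
  obtain ⟨i, hi, rfl⟩ := List.mem_iff_getElem.1 hx
  have h1 := congrArg (fun l => l[i]?) heq
  simp only [List.getElem?_map, List.getElem?_eq_getElem hi] at h1
  simpa using h1.symm

-- the max drops by exactly 1 after one global round
theorem foldl_max_round (g : Int → Int) (arr : List Int)
    (h0 : ∀ y : Int, 0 ≤ g y)
    (hstep : ∀ x ∈ arr, g x = if fA x = x then 0 else 1 + g (fA x))
    (hne : arr ≠ arr.map fA) :
    arr.foldl (fun b x => max b (g x)) 0 = 1 + (arr.map fA).foldl (fun b x => max b (g x)) 0 := by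
  obtain ⟨z, hz, hzne⟩ := exists_nonfixed hne
  have hge1 : 1 ≤ arr.foldl (fun b x => max b (g x)) 0 := by
    have h1 := foldl_max_mem_le g arr 0 z hz
    have h2 : g z = 1 + g (fA z) := by rw [hstep z hz, if_neg hzne]
    have h3 := h0 (fA z)
    omega
  apply le_antisymm
  · rcases foldl_max_cases g arr 0 with h | ⟨x, hx, h⟩
    · have := foldl_max_acc_le g (arr.map fA) 0
      omega
    · rw [h]
      have h2 := foldl_max_mem_le g (arr.map fA) 0 (fA x) (List.mem_map_of_mem hx)
      by_cases hfix : fA x = x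
      · have h3 : g x = 0 := by rw [hstep x hx, if_pos hfix]
        have h4 := foldl_max_acc_le g (arr.map fA) 0
        omega
      · have h3 : g x = 1 + g (fA x) := by rw [hstep x hx, if_neg hfix]
        omega
  · rcases foldl_max_cases g (arr.map fA) 0 with h | ⟨y, hy, h⟩
    · rw [h]; omega
    · rw [h]
      obtain ⟨x, hx, rfl⟩ := List.mem_map.1 hy
      by_cases hfix : fA x = x
      · have h3 : g (fA x) = 0 := by rw [hfix, hstep x hx, if_pos hfix]
        omega
      · have h3 : g x = 1 + g (fA x) := by rw [hstep x hx, if_neg hfix]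
        have h4 := foldl_max_mem_le g arr 0 x hx
        omega

-- the ideal answer B computes, stated with sW (bridged to solution_alt at the end)
def altW (arr : List Int) : Int := arr.foldl (fun b x => max b (sW x)) 0

theorem maxs_round (arr : List Int)
    (hall : ∀ x ∈ arr, G x)
    (hne : arr ≠ arr.map fA) :
    altW arr = 1 + altW (arr.map fA) := by
  unfold altW
  exact foldl_max_round sW arr (fun y => sW_nonneg y)
    (fun x hx => sW_rec x (hall x hx)) hne

theorem maxs_fixed (arr : List Int) (hall : ∀ x ∈ arr, G x) (h : ∀ x ∈ arr, fA x = x) :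
    altW arr = 0 := by
  unfold altW
  induction arr with
  | nil => rfl
  | cons y t ih =>
    simp only [List.foldl]
    rw [sW_fix y (hall y List.mem_cons_self) (h y List.mem_cons_self)]
    simpa using ih (fun x hx => hall x (List.mem_cons_of_mem _ hx))
      (fun x hx => h x (List.mem_cons_of_mem _ hx))

-- the main loop invariant: with enough fuel, A's loop returns ret + the ideal answer
theorem aLoop_eq (fuel : Nat) : ∀ (arr : List Int) (ret : Int),
    fuel ≤ pvFuel → (∀ x ∈ arr, G x ∧ mu x ≤ fuel) →
    aLoop fuel arr ret = ret + altW arr := by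
  induction fuel with
  | zero =>
    intro arr ret _ hall
    have harr : arr = [] := by
      cases arr with
      | nil => rfl
      | cons y t =>
        have := (hall y List.mem_cons_self).2
        have := mu_pos y
        omega
    subst harr
    simp [aLoop, altW]
  | succ fuel ih =>
    intro arr ret hle hall
    simp only [aLoop]
    by_cases heq : arr = arr.map fA
    · rw [if_pos heq, maxs_fixed arr (fun x hx => (hall x hx).1) (fixed_of_eq_map heq)]
      omega
    · rw [if_neg heq]
      obtain ⟨z, hz, hzne⟩ := exists_nonfixed heq
      have hfuel2 : 2 ≤ fuel + 1 := by
        have h3 := mu_pos (fA z)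
        have h4 := (key_decrease z (hall z hz).1 hzne).2
        have := (hall z hz).2
        omega
      rw [ih (arr.map fA) (ret + 1) (by omega) ?_]
      · rw [maxs_round arr (fun x hx => (hall x hx).1) heq]; ring
      · intro y hy
        obtain ⟨x, hx, rfl⟩ := List.mem_map.1 hy
        by_cases hfix : fA x = x
        · refine ⟨by rw [hfix]; exact (hall x hx).1, ?_⟩
          have hmu1 : mu (fA x) = 1 := by
            unfold mu; rw [if_pos (by rw [hfix]; exact hfix)]
          omega
        · have ⟨hg', hlt⟩ := key_decrease x (hall x hx).1 hfix
          exact ⟨hg', by have := (hall x hx).2; omega⟩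

theorem mu_le_pvFuel (x : Int) (hg : G x) (hd : pvDomInt x = true) : mu x ≤ pvFuel := by
  have hx : x ≤ 2147483648 := by
    unfold pvDomInt at hd
    simpa using (of_decide_eq_true hd).2
  unfold mu pvFuel
  split_ifs with h1 h2
  · omega
  · omega
  · rcases fA_cases x hg h1 with ⟨h50, _, _⟩ | ⟨h1', h50, _, _⟩ <;> omega

-- B's halving phase: with enough fuel it lands on a non-halvable value, conserving c + sW
theorem halveGo_spec : ∀ (f : Nat) (x c : Int), G x → x < 50 * 2 ^ f →
    G (halveGo f x c).1 ∧ ¬ (50 ≤ (halveGo f x c).1 ∧ (halveGo f x c).1 % 2 = 0) ∧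
      c + sW x = (halveGo f x c).2 + sW (halveGo f x c).1 := by
  intro f
  induction f with
  | zero =>
    intro x c hg hb
    have hx : x < 50 := by simpa using hb
    simp only [halveGo]
    exact ⟨hg, by omega, trivial⟩
  | succ f ih =>
    intro x c hg hb
    simp only [halveGo, pvMod2, pvDiv2]
    by_cases h : 50 ≤ x ∧ x % 2 = 0
    · rw [if_pos h]
      have hg2 : G (x / 2) := Or.inl (by omega)
      have hk : (0:Int) < 2 ^ f := by positivity
      have hb2 : x / 2 < 50 * 2 ^ f := by
        have hp : (2:Int) ^ (f + 1) = 2 ^ f * 2 := pow_succ 2 f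
        rw [hp] at hb
        omega
      obtain ⟨r1, r2, r3⟩ := ih (x / 2) (c + 1) hg2 hb2
      refine ⟨r1, r2, ?_⟩
      have hs : sW x = 1 + sW (x / 2) := by
        rw [sW_rec x hg, fA_eval, if_pos h, if_neg (by omega)]
      omega
    · rw [if_neg h]
      exact ⟨hg, h, rfl⟩

-- B's doubling phase: with enough fuel it reaches an odd value ≥ 50, conserving c + sW
theorem doubleGo_spec : ∀ (f : Nat) (x c : Int), 0 < x → x % 2 = 1 → 50 ≤ x + f →
    0 < (doubleGo f x c).1 ∧ (doubleGo f x c).1 % 2 = 1 ∧ 50 ≤ (doubleGo f x c).1 ∧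
      c + sW x = (doubleGo f x c).2 + sW (doubleGo f x c).1 := by
  intro f
  induction f with
  | zero =>
    intro x c hp hod hb
    exact ⟨hp, hod, by simpa using hb, rfl⟩
  | succ f ih =>
    intro x c hp hod hb
    simp only [doubleGo]
    by_cases h : x < 50
    · rw [if_pos h]
      have hb2 : 50 ≤ (2 * x + 1) + (f : Int) := by push_cast at hb ⊢; omega
      obtain ⟨r1, r2, r3, r4⟩ := ih (2 * x + 1) (c + 1) (by omega) (by omega) hb2
      refine ⟨r1, r2, r3, ?_⟩
      have hs : sW x = 1 + sW (2 * x + 1) := by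
        have hg : G x := Or.inl (by omega)
        have hfa : fA x = x * 2 + 1 := by
          rw [fA_eval, if_neg (by omega), if_pos ⟨h, by omega⟩]
        rw [sW_rec x hg, hfa, if_neg (by omega), show x * 2 + 1 = 2 * x + 1 by ring]
      omega
    · rw [if_neg h]
      exact ⟨hp, hod, by omega, rfl⟩

-- B's per-element count equals the ideal count on the admitted domain
theorem stepsB_eq_sW (x : Int) (hg : G x) (hd : x ≤ 2147483648) : stepsB x = sW x := by
  unfold stepsB
  have hb : x < 50 * 2 ^ (32 : ℕ) := by
    have : (50 : Int) * 2 ^ (32 : ℕ) = 214748364800 := by norm_num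
    omega
  obtain ⟨hg1, hnc, heq⟩ := halveGo_spec 32 x 0 hg hb
  simp only [pvMod2]
  by_cases hc : (halveGo 32 x 0).1 % 2 = 1 ∧ 0 < (halveGo 32 x 0).1 ∧ (halveGo 32 x 0).1 < 50
  · rw [if_pos hc]
    obtain ⟨r1, r2, r3, r4⟩ :=
      doubleGo_spec 64 (halveGo 32 x 0).1 (halveGo 32 x 0).2 hc.2.1 hc.1 (by omega)
    have hfix : sW (doubleGo 64 (halveGo 32 x 0).1 (halveGo 32 x 0).2).1 = 0 := by
      refine sW_fix _ (Or.inl (by omega)) ?_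
      rw [fA_eval, if_neg (by omega), if_neg (by omega)]
    omega
  · rw [if_neg hc]
    have h0 : sW (halveGo 32 x 0).1 = 0 := by
      rw [sW_eval, if_neg hnc, if_neg (by omega)]
    omega

-- bridge: solution_alt computes the ideal answer on the admitted inputs
theorem alt_eq_altW (arr : List Int)
    (hall : ∀ x ∈ arr, G x ∧ x ≤ 2147483648) :
    solution_alt arr = altW arr := by
  unfold solution_alt altW
  rw [List.map_congr_left (fun x hx => stepsB_eq_sW x (hall x hx).1 (hall x hx).2),
      List.foldl_map]

-- ===== VERDICT (by name: the statement is the Claim_ definition above) =====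
theorem solution_spec : Claim_equal_solution := by
  intro arr hdom hpre
  unfold Spec_solution solution
  have hdall : ∀ x ∈ arr, pvDomInt x = true := by
    intro x hx
    unfold Dom_solution at hdom
    exact (List.all_eq_true.1 hdom) x hx
  have hall : ∀ x ∈ arr, G x ∧ mu x ≤ pvFuel := by
    intro x hx
    have hg : G x := hpre x hx
    exact ⟨hg, mu_le_pvFuel x hg (hdall x hx)⟩
  rw [aLoop_eq pvFuel arr 0 (le_refl _) hall,
      alt_eq_altW arr (fun x hx => ⟨hpre x hx, by
        have := hdall x hx
        unfold pvDomInt at this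
        simpa using (of_decide_eq_true this).2⟩)]
  ring
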